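-- pv_equiv track=rewrite | github.com/vfeng2023/AI | AI/AI 1/Unit 1/Sliding puzzles Extensions/slidingpuzzleExt.py | kDFSearch
-- ===== SOURCE A (Python) =====
-- def find_goal(state):
--     toRet = sorted(state)
--     toRet = toRet[1:]
--     toRet.append(".")
--     return "".join([str(ch) for ch in toRet])
--
-- def goal_test(state):
--     return state == find_goal(state)
--
-- def get_children(state,size):
--     states = []
--     spot = state.find(".")
--     row = spot//size
--     col = spot%size
--     if row - 1 >=0:
--         toRet = swap(state,(row-1)*size + col,spot)
--         states.append(toRet)
--
--     if row + 1 < size: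
--         states.append(swap(state,(row+1)*size+col,spot))
--     if col + 1 < size:
--         states.append(swap(state,row*size+col+1,spot))
--
--     if col -1 >=0:
--         states.append(swap(state,row*size+col-1,spot))
--     return states
--
-- def swap(s,i,j):
--     arr = list(s)
--     temp= arr[i]
--     arr[i] = arr[j]
--     arr[j] = temp
--     return "".join(arr)
--
-- def kDFSearch(start,k,size):
--     fringe = list()
--     start_state = start
--     start_depth = 0
--     start_ancestors = set()
--     start_ancestors.add(start)
--     fringe.append((start_state,start_depth,start_ancestors))
--
--     while len(fringe) > 0:
--         state,depth,ancestors = fringe.pop()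
--         if goal_test(state):
--             return depth
--
--         if depth < k:
--             children = get_children(state,size)
--             for c in children:
--                 if c not in ancestors:
--                     new_ancestors = ancestors.copy()
--                     new_ancestors.add(c)
--                     fringe.append((c,depth+1,new_ancestors))
--     return None
-- ===== SOURCE B (Python) =====
-- # Recursive depth-limited DFS: goal computed once, a single backtracking path set
-- # (instead of copying the ancestor set per node), children derived directly from
-- # the blank's index; child order matches the stack search's exploration order.
-- def kDFSearch(start, k, size):
--     goal = "".join(sorted(start)[1:]) + "."
--     path = {start}
--
--     def swap2(state, i, j):
--         arr = list(state)
--         arr[i], arr[j] = arr[j], arr[i]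
--         return "".join(arr)
--
--     def dfs(state, depth):
--         if state == goal:
--             return depth
--         if depth >= k:
--             return None
--         spot = state.find(".")
--         row, col = divmod(spot, size)
--         moves = []
--         if col - 1 >= 0:
--             moves.append(spot - 1)
--         if col + 1 < size:
--             moves.append(spot + 1)
--         if row + 1 < size:
--             moves.append(spot + size)
--         if row - 1 >= 0:
--             moves.append(spot - size)
--         for t in moves:
--             child = swap2(state, spot, t)
--             if child not in path:
--                 path.add(child)
--                 r = dfs(child, depth + 1)
--                 path.discard(child)
--                 if r is not None:
--                     return r
--         return None
--
--     return dfs(start, 0)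
-- ===== Notes on version B (the rewrite author's own statement) =====
-- stated objective: faster
-- what changed: Replaces the explicit-stack search that copies the whole ancestor set for every pushed child and re-derives the goal by sorting the state at every node with a recursive DFS that precomputes the goal once, keeps a single backtracking path set, and derives the blank's neighbour indices directly from its position (child order matched to the stack's pop order).
-- outside the precondition, e.g. on kDFSearch('abcd', 1, 2): A returns None, B returns None; on kDFSearch('abcde.ghi', 1, 2): A returns None, B returns None
import Mathlib
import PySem

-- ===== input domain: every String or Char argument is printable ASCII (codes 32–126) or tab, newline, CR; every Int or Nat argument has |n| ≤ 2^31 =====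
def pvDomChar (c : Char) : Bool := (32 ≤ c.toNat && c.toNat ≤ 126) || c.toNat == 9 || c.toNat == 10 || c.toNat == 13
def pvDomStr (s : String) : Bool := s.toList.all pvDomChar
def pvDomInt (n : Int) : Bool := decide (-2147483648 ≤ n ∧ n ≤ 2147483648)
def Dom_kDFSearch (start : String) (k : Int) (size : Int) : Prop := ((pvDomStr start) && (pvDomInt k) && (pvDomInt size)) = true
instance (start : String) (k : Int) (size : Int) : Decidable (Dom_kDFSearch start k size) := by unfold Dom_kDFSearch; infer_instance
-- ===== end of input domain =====

-- B replaces A's stack search (per-node ancestor-set copies, goal re-derived by sorting at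
-- every node) by a recursive DFS with one backtracking path set, the goal computed once,
-- and the blank's neighbour indices obtained directly from spot (faster; same child order).

-- ===== PORT A =====
def findGoal (state : String) : String :=
  let toRet := PySem.List.sorted state.toList (fun c => c) false
  let toRet := PySem.List.slice toRet (some 1) none
  let toRet := toRet ++ ['.']
  String.ofList toRet

def goalTest (state : String) : Bool := state == findGoal state

-- Python's swap raises IndexError out of range (pyGet? = none); that case returns s,
-- unreachable under Pre_.
def swapA (s : String) (i j : Int) : String :=
  let arr := s.toList
  match PySem.List.pyGet? arr i, PySem.List.pyGet? arr j with
  | some a, some b => String.ofList (PySem.List.pySetD (PySem.List.pySetD arr i b) j a)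
  | _, _ => s

def getChildren (state : String) (size : Int) : List String :=
  let spot := PySem.Str.find state "."
  let row := PySem.Int.floordiv spot size
  let col := PySem.Int.mod spot size
  let states : List String := []
  let states := if row - 1 ≥ 0 then states ++ [swapA state ((row - 1) * size + col) spot] else states
  let states := if row + 1 < size then states ++ [swapA state ((row + 1) * size + col) spot] else states
  let states := if col + 1 < size then states ++ [swapA state (row * size + col + 1) spot] else states
  let states := if col - 1 ≥ 0 then states ++ [swapA state (row * size + col - 1) spot] else states
  states

-- weight of a fringe, used only for kRun's termination
def nodeW (k d : Int) : Nat := 5 ^ (k - d).toNat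

def fringeW (k : Int) (fringe : List (String × Int × PySem.Set String)) : Nat :=
  (fringe.map (fun t => nodeW k t.2.1)).sum

theorem getChildren_len (state : String) (size : Int) : (getChildren state size).length ≤ 4 := by
  simp only [getChildren]
  split_ifs <;> simp

theorem fringeW_tail_lt (k : Int) (x : String × Int × PySem.Set String)
    (rest : List (String × Int × PySem.Set String)) :
    fringeW k rest < fringeW k (x :: rest) := by
  have h5 : 0 < nodeW k x.2.1 := pow_pos (by norm_num) _
  simp [fringeW]
  omega

theorem fringeW_push_lt (k size : Int) (s : String) (d : Int) (anc : PySem.Set String)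
    (rest : List (String × Int × PySem.Set String)) (p : String → Bool)
    (f : String → PySem.Set String) (hd : d < k) :
    fringeW k ((((getChildren s size).filter p).map (fun c => (c, d + 1, f c))).reverse ++ rest)
      < fringeW k ((s, d, anc) :: rest) := by
  have hlen : ((getChildren s size).filter p).length ≤ 4 :=
    le_trans (List.length_filter_le _ _) (getChildren_len s size)
  have hb : (k - d).toNat = (k - (d + 1)).toNat + 1 := by omega
  have h5 : 0 < 5 ^ (k - (d + 1)).toNat := pow_pos (by norm_num) _
  unfold fringeW nodeW
  rw [List.map_append, List.sum_append, List.map_reverse, List.sum_reverse, List.map_map]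
  have hcm : (((getChildren s size).filter p).map
      ((fun t : String × Int × PySem.Set String => 5 ^ (k - t.2.1).toNat) ∘ (fun c => (c, d + 1, f c)))).sum
      = ((getChildren s size).filter p).length * 5 ^ (k - (d + 1)).toNat := by
    simp only [Function.comp_def]
    rw [List.map_const']
    simp [List.sum_replicate]
  rw [hcm, List.map_cons, List.sum_cons, hb, pow_succ]
  have h4 : (List.filter p (getChildren s size)).length * 5 ^ (k - (d + 1)).toNat
      ≤ 4 * 5 ^ (k - (d + 1)).toNat := Nat.mul_le_mul_right _ hlen
  omega

def kRun (k size : Int) (fringe : List (String × Int × PySem.Set String)) : Option Int :=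
  match fringe with
  | [] => none
  | (state, depth, ancestors) :: rest =>
    if goalTest state then some depth
    else if depth < k then
      let pushed := ((getChildren state size).filter
          (fun c => !(PySem.Set.contains ancestors c))).map
          (fun c => (c, depth + 1, PySem.Set.add ancestors c))
      kRun k size (pushed.reverse ++ rest)
    else kRun k size rest
termination_by fringeW k fringe
decreasing_by
  · exact fringeW_push_lt k size state depth ancestors rest _ _ (by assumption)
  · exact fringeW_tail_lt k _ _

def kDFSearch (start : String) (k : Int) (size : Int) : Option Int :=
  kRun k size [(start, 0, PySem.Set.add PySem.Set.empty start)]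

-- ===== PORT B =====
def swapB (state : String) (i j : Int) : String :=
  let arr := state.toList
  match PySem.List.pyGet? arr i, PySem.List.pyGet? arr j with
  | some a, some b => String.ofList (PySem.List.pySetD (PySem.List.pySetD arr i b) j a)
  | _, _ => state

mutual
def dfsB (k size : Int) (goal state : String) (depth : Int) (path : PySem.Set String) : Option Int :=
  if state = goal then some depth
  else if h : depth < k then
    let spot := PySem.Str.find state "."
    let row := PySem.Int.floordiv spot size
    let col := PySem.Int.mod spot size
    let moves : List Int :=
      (if col - 1 ≥ 0 then [spot - 1] else []) ++
      (if col + 1 < size then [spot + 1] else []) ++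
      (if row + 1 < size then [spot + size] else []) ++
      (if row - 1 ≥ 0 then [spot - size] else [])
    tryMoves k size goal state depth path spot moves h
  else none
termination_by ((k - depth).toNat, 1, 0)

def tryMoves (k size : Int) (goal state : String) (depth : Int) (path : PySem.Set String)
    (spot : Int) (moves : List Int) (h : depth < k) : Option Int :=
  match moves with
  | [] => none
  | t :: rest =>
    let child := swapB state spot t
    if PySem.Set.contains path child then
      tryMoves k size goal state depth path spot rest h
    else
      match dfsB k size goal child (depth + 1) (PySem.Set.add path child) with
      | some r => some r
      | none => tryMoves k size goal state depth path spot rest h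
termination_by ((k - depth).toNat, 0, moves.length)
end

def kDFSearch_alt (start : String) (k : Int) (size : Int) : Option Int :=
  let goal := findGoal start
  dfsB k size goal start 0 (PySem.Set.add PySem.Set.empty start)

-- ===== PRECONDITION & SPEC =====
-- Pre_ admits every input with k ≤ 0 or a start that already is A's goal string (A answers
-- before expanding anything), and otherwise restricts to well-formed puzzles: size ≥ 1,
-- |start| = size², '.' present. Outside that, A raises IndexError/ZeroDivisionError on some
-- inputs, and where it does return (malformed boards whose swaps stay in range only through
-- Python's negative-index wraparound) B happens to return the same value, but that agreement
-- rests on wraparound arithmetic the equivalence proof does not claim, so Pre_ excludes it.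
def Pre_kDFSearch (start : String) (k : Int) (size : Int) : Prop :=
  k ≤ 0
  ∨ String.ofList (PySem.List.slice (PySem.List.sorted start.toList (fun c => c) false) (some 1) none ++ ['.']) = start
  ∨ (1 ≤ size ∧ start.toList.length = (size * size).toNat ∧ '.' ∈ start.toList)
instance (start : String) (k : Int) (size : Int) : Decidable (Pre_kDFSearch start k size) := by
  unfold Pre_kDFSearch; infer_instance

def pvWitness_kDFSearch : String × Int × Int := ("ab.c", 3, 2)

def Spec_kDFSearch (start : String) (k : Int) (size : Int) (out : Option Int) : Prop := out = kDFSearch_alt start k size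
instance (start : String) (k : Int) (size : Int) (out : Option Int) : Decidable (Spec_kDFSearch start k size out) := by unfold Spec_kDFSearch; infer_instance

-- ===== CLAIM (what is proved, stated in full; the proofs are below) =====
def Claim_equal_kDFSearch : Prop := ∀ (start : String) (k : Int) (size : Int), Dom_kDFSearch start k size → Pre_kDFSearch start k size → Spec_kDFSearch start k size (kDFSearch start k size)

-- ===== LEMMAS AND PROOFS =====

-- proof-side first-success fold over a fringe (B's dfs applied node by node)
def popFold (k size : Int) (goal : String) : List (String × Int × PySem.Set String) → Option Int
  | [] => none
  | (s, d, anc) :: rest =>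
    match dfsB k size goal s d anc with
    | some r => some r
    | none => popFold k size goal rest

theorem findGoal_perm {s t : String} (h : s.toList.Perm t.toList) : findGoal s = findGoal t := by
  unfold findGoal
  rw [PySem.List.sorted_eq_sorted_of_perm s.toList t.toList _ (fun a b hab => hab) h]

theorem swapA_eq (s : String) (i j : Int) (hi0 : 0 ≤ i) (hi : i < (s.toList.length : Int))
    (hj0 : 0 ≤ j) (hj : j < (s.toList.length : Int)) :
    swapA s i j = String.ofList
      ((s.toList.set i.toNat (s.toList[j.toNat]'(by omega))).set j.toNat (s.toList[i.toNat]'(by omega))) := by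
  simp only [swapA]
  rw [PySem.List.pyGet?_of_nonneg _ hi0, PySem.List.pyGet?_of_nonneg _ hj0,
    List.getElem?_eq_getElem (by omega), List.getElem?_eq_getElem (by omega)]
  simp only [PySem.List.pySetD_of_nonneg _ _ hi0, PySem.List.pySetD_of_nonneg _ _ hj0]

theorem swap_comm (s : String) (i j : Int) (hi0 : 0 ≤ i) (hi : i < (s.toList.length : Int))
    (hj0 : 0 ≤ j) (hj : j < (s.toList.length : Int)) :
    swapB s i j = swapA s j i := by
  have hB : swapB s i j = swapA s i j := rfl
  rw [hB, swapA_eq s i j hi0 hi hj0 hj, swapA_eq s j i hj0 hj hi0 hi]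
  by_cases hij : i.toNat = j.toNat
  · simp [hij]
  · rw [List.set_comm _ _ hij]

theorem swap_perm (s : String) (i j : Int) (hi0 : 0 ≤ i) (hi : i < (s.toList.length : Int))
    (hj0 : 0 ≤ j) (hj : j < (s.toList.length : Int)) :
    (swapA s i j).toList.Perm s.toList := by
  rw [swapA_eq s i j hi0 hi hj0 hj, String.toList_ofList]
  exact List.set_set_perm (by omega) (by omega)

theorem popFold_append (k size : Int) (goal : String) (X Y : List (String × Int × PySem.Set String)) :
    popFold k size goal (X ++ Y) =
      match popFold k size goal X with
      | some r => some r
      | none => popFold k size goal Y := by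
  induction X with
  | nil => simp [popFold]
  | cons x xs ih =>
    obtain ⟨s, d, anc⟩ := x
    rw [List.cons_append, popFold, popFold]
    cases dfsB k size goal s d anc with
    | some r => rfl
    | none => exact ih

theorem tryMoves_eq (k size : Int) (goal s : String) (d : Int) (anc : PySem.Set String)
    (spot : Int) (h : d < k) :
    ∀ ms : List Int, (∀ t ∈ ms, swapB s spot t = swapA s t spot) →
    tryMoves k size goal s d anc spot ms h =
      popFold k size goal (((ms.map (fun t => swapA s t spot)).filter
        (fun c => !(PySem.Set.contains anc c))).map (fun c => (c, d + 1, PySem.Set.add anc c))) := by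
  intro ms
  induction ms with
  | nil => intro _; rw [tryMoves]; simp [popFold]
  | cons t rest ih =>
    intro hms
    have hsw : swapB s spot t = swapA s t spot := hms t (by simp)
    rw [tryMoves]
    simp only [hsw, List.map_cons, List.filter_cons]
    by_cases hc : PySem.Set.contains anc (swapA s t spot)
    · simp only [hc, Bool.not_true, if_pos]
      exact ih (fun t' ht' => hms t' (by simp [ht']))
    · simp only [hc, Bool.not_false, reduceIte, List.map_cons]
      rw [popFold]
      cases hd : dfsB k size goal (swapA s t spot) (d + 1) (PySem.Set.add anc (swapA s t spot)) with
      | some r => rfl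
      | none => exact ih (fun t' ht' => hms t' (by simp [ht']))

-- B's neighbour-index list (proof-side mirror of the inline `moves` in dfsB)
def movesB (state : String) (size : Int) : List Int :=
  let spot := PySem.Str.find state "."
  let row := PySem.Int.floordiv spot size
  let col := PySem.Int.mod spot size
  (if col - 1 ≥ 0 then [spot - 1] else []) ++
  (if col + 1 < size then [spot + 1] else []) ++
  (if row + 1 < size then [spot + size] else []) ++
  (if row - 1 ≥ 0 then [spot - size] else [])

theorem getChildren_eq (s : String) (size : Int) :
    getChildren s size = ((movesB s size).reverse).map (fun t => swapA s t (PySem.Str.find s ".")) := by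
  simp only [getChildren, movesB]
  have hid : PySem.Int.floordiv (PySem.Str.find s ".") size * size
      + PySem.Int.mod (PySem.Str.find s ".") size = PySem.Str.find s "." :=
    PySem.Int.floordiv_mul_add_mod _ _
  set spot := PySem.Str.find s "." with hspot
  set row := PySem.Int.floordiv spot size with hrow
  set col := PySem.Int.mod spot size with hcol
  have e1 : (row - 1) * size + col = spot - size := by linear_combination hid
  have e2 : (row + 1) * size + col = spot + size := by linear_combination hid
  have e3 : row * size + col + 1 = spot + 1 := by linear_combination hid
  have e4 : row * size + col - 1 = spot - 1 := by linear_combination hid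
  rw [e1, e2, e3, e4]
  split_ifs <;> simp

theorem spot_facts (size : Int) (s : String) (hsz : 1 ≤ size)
    (hlens : s.toList.length = (size * size).toNat) (hdots : '.' ∈ s.toList) :
    0 ≤ PySem.Str.find s "." ∧ PySem.Str.find s "." < size * size := by
  have hnn : (0:Int) ≤ size * size := by positivity
  have h0 : 0 ≤ PySem.Str.find s "." := by
    rw [PySem.Str.find_nonneg_iff]
    simpa using (List.singleton_infix_iff '.' s.toList).mpr hdots
  refine ⟨h0, ?_⟩
  have h0' : 0 ≤ PySem.Chars.find s.toList ".".toList := by simpa using h0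
  obtain ⟨hpre, -⟩ := PySem.Chars.find_spec h0'
  have hlt : (PySem.Chars.find s.toList ".".toList).toNat < s.toList.length := by
    have h1 := hpre.length_le
    simp only [List.length_drop] at h1
    have h2 : (".".toList).length = 1 := by decide
    omega
  have : ((size * size).toNat : Int) = size * size := Int.toNat_of_nonneg hnn
  simp only [PySem.Str.find_eq] at *
  omega

theorem movesB_bounds (size : Int) (s : String) (hsz : 1 ≤ size)
    (hlens : s.toList.length = (size * size).toNat) (hdots : '.' ∈ s.toList) :
    ∀ t ∈ movesB s size, 0 ≤ t ∧ t < size * size := by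
  obtain ⟨h0, hlt⟩ := spot_facts size s hsz hlens hdots
  simp only [movesB]
  have hid : PySem.Int.floordiv (PySem.Str.find s ".") size * size
      + PySem.Int.mod (PySem.Str.find s ".") size = PySem.Str.find s "." :=
    PySem.Int.floordiv_mul_add_mod _ _
  set spot := PySem.Str.find s "." with hspot
  set row := PySem.Int.floordiv spot size with hrow
  set col := PySem.Int.mod spot size with hcol
  have hspos : (0:Int) < size := by omega
  have hr0 : 0 ≤ row := by
    rw [hrow, PySem.Int.floordiv_eq_ediv_of_pos hspos]; exact Int.ediv_nonneg h0 hspos.le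
  have hrlt : row < size := by
    rw [hrow, PySem.Int.floordiv_eq_ediv_of_pos hspos]
    exact (Int.ediv_lt_iff_lt_mul hspos).mpr (by linarith)
  have hc0 : 0 ≤ col := hcol ▸ PySem.Int.mod_nonneg _ hspos
  have hclt : col < size := hcol ▸ PySem.Int.mod_lt _ hspos
  intro t ht
  simp only [List.mem_append, List.mem_ite_nil_right, List.mem_singleton] at ht
  have hints1 : 0 ≤ row * size := mul_nonneg hr0 hspos.le
  have hints2 : row * size ≤ (size - 1) * size :=
    mul_le_mul_of_nonneg_right (by omega) hspos.le
  rcases ht with ((⟨hcond, ht⟩ | ⟨hcond, ht⟩) | ⟨hcond, ht⟩) | ⟨hcond, ht⟩ <;> subst ht <;>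
    constructor <;> nlinarith

theorem node_step (k size : Int) (start s : String) (d : Int) (anc : PySem.Set String)
    (hsz : 1 ≤ size) (hlen : start.toList.length = (size * size).toNat) (hdot : '.' ∈ start.toList)
    (hperm : s.toList.Perm start.toList) (hng : s ≠ findGoal start) (hd : d < k) :
    dfsB k size (findGoal start) s d anc =
      popFold k size (findGoal start)
        ((((getChildren s size).filter (fun c => !(PySem.Set.contains anc c))).map
          (fun c => (c, d + 1, PySem.Set.add anc c))).reverse) := by
  have hlens : s.toList.length = (size * size).toNat := by rw [hperm.length_eq, hlen]
  have hdots : '.' ∈ s.toList := hperm.mem_iff.mpr hdot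
  have hlenInt : (s.toList.length : Int) = size * size := by
    rw [hlens]; exact Int.toNat_of_nonneg (by positivity)
  obtain ⟨h0, hlt⟩ := spot_facts size s hsz hlens hdots
  have hb := movesB_bounds size s hsz hlens hdots
  have hswaps : ∀ t ∈ movesB s size,
      swapB s (PySem.Str.find s ".") t = swapA s t (PySem.Str.find s ".") := by
    intro t ht
    obtain ⟨ht0, htlt⟩ := hb t ht
    exact swap_comm s _ t h0 (by omega) ht0 (by omega)
  rw [dfsB, if_neg hng, dif_pos hd]
  show tryMoves k size (findGoal start) s d anc (PySem.Str.find s ".") (movesB s size) hd = _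
  rw [tryMoves_eq k size (findGoal start) s d anc (PySem.Str.find s ".") hd (movesB s size) hswaps,
    getChildren_eq s size]
  congr 1
  rw [List.map_reverse, List.filter_reverse, List.map_reverse, List.reverse_reverse]

theorem children_perm (size : Int) (start s : String)
    (hsz : 1 ≤ size) (hlen : start.toList.length = (size * size).toNat) (hdot : '.' ∈ start.toList)
    (hperm : s.toList.Perm start.toList) :
    ∀ c ∈ getChildren s size, c.toList.Perm start.toList := by
  have hlens : s.toList.length = (size * size).toNat := by rw [hperm.length_eq, hlen]
  have hdots : '.' ∈ s.toList := hperm.mem_iff.mpr hdot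
  have hlenInt : (s.toList.length : Int) = size * size := by
    rw [hlens]; exact Int.toNat_of_nonneg (by positivity)
  obtain ⟨h0, hlt⟩ := spot_facts size s hsz hlens hdots
  have hb := movesB_bounds size s hsz hlens hdots
  rw [getChildren_eq s size]
  intro c hc
  simp only [List.mem_map, List.mem_reverse] at hc
  obtain ⟨t, ht, rfl⟩ := hc
  obtain ⟨ht0, htlt⟩ := hb t ht
  exact (swap_perm s t _ ht0 (by omega) h0 (by omega)).trans hperm

theorem kRun_eq (k size : Int) (start : String)
    (hsz : 1 ≤ size) (hlen : start.toList.length = (size * size).toNat) (hdot : '.' ∈ start.toList) :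
    ∀ N, ∀ fringe, fringeW k fringe ≤ N →
    (∀ x ∈ fringe, (x.1).toList.Perm start.toList) →
    kRun k size fringe = popFold k size (findGoal start) fringe := by
  intro N
  induction N with
  | zero =>
    intro fringe hW _
    match fringe with
    | [] => rw [kRun, popFold]
    | (s, d, anc) :: rest =>
      exfalso
      have := fringeW_tail_lt k (s, d, anc) rest
      omega
  | succ N ih =>
    intro fringe hW hperm
    match fringe with
    | [] => rw [kRun, popFold]
    | (s, d, anc) :: rest =>
      have hps : s.toList.Perm start.toList := hperm (s, d, anc) (by simp)
      have hrestp : ∀ x ∈ rest, (x.1).toList.Perm start.toList :=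
        fun x hx => hperm x (by simp [hx])
      rw [kRun, popFold]
      by_cases hg : goalTest s = true
      · have hgs : s = findGoal s := by
          have := hg; unfold goalTest at this; exact eq_of_beq this
        have hgoal : s = findGoal start := by rw [hgs]; exact findGoal_perm hps
        have hdfs : dfsB k size (findGoal start) s d anc = some d := by
          rw [dfsB, if_pos hgoal]
        rw [if_pos hg, hdfs]
      · have hgs : s ≠ findGoal start := by
          intro hcon
          apply hg
          unfold goalTest
          have : findGoal s = findGoal start := findGoal_perm hps
          rw [beq_iff_eq, this, ← hcon]
        rw [if_neg hg]
        by_cases hk : d < k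
        · rw [if_pos hk]
          have hnewW : fringeW k
              ((((getChildren s size).filter (fun c => !(PySem.Set.contains anc c))).map
                (fun c => (c, d + 1, PySem.Set.add anc c))).reverse ++ rest) ≤ N := by
            have hlt2 : fringeW k
                ((((getChildren s size).filter (fun c => !(PySem.Set.contains anc c))).map
                  (fun c => (c, d + 1, PySem.Set.add anc c))).reverse ++ rest)
                < fringeW k ((s, d, anc) :: rest) :=
              fringeW_push_lt k size s d anc rest _ _ hk
            omega
          have hnewp : ∀ x ∈ (((getChildren s size).filter
              (fun c => !(PySem.Set.contains anc c))).map
              (fun c => (c, d + 1, PySem.Set.add anc c))).reverse ++ rest,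
              (x.1).toList.Perm start.toList := by
            intro x hx
            rcases List.mem_append.mp hx with hx | hx
            · rw [List.mem_reverse] at hx
              obtain ⟨c, hc, rfl⟩ := List.mem_map.mp hx
              exact children_perm size start s hsz hlen hdot hps c (List.mem_of_mem_filter hc)
            · exact hrestp x hx
          rw [ih _ hnewW hnewp, popFold_append,
            ← node_step k size start s d anc hsz hlen hdot hps hgs hk]
        · rw [if_neg hk]
          have hdfs : dfsB k size (findGoal start) s d anc = none := by
            rw [dfsB, if_neg hgs, dif_neg hk]
          rw [hdfs]
          have hrW : fringeW k rest ≤ N := by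
            have := fringeW_tail_lt k (s, d, anc) rest
            omega
          exact ih rest hrW hrestp

-- ===== VERDICT (by name: the statement is the Claim_ definition above) =====
theorem kDFSearch_spec : Claim_equal_kDFSearch := by
  intro start k size _ hpre
  unfold Spec_kDFSearch kDFSearch kDFSearch_alt
  have hpre' : k ≤ 0 ∨ findGoal start = start
      ∨ (1 ≤ size ∧ start.toList.length = (size * size).toNat ∧ '.' ∈ start.toList) := hpre
  by_cases hgoal : findGoal start = start
  · have hdfs : dfsB k size (findGoal start) start 0 (PySem.Set.add PySem.Set.empty start)
        = some 0 := by rw [dfsB, if_pos hgoal.symm]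
    rw [kRun, if_pos (by unfold goalTest; rw [beq_iff_eq]; exact hgoal.symm)]
    exact hdfs.symm
  · have hng : ¬ goalTest start = true := by
      unfold goalTest; rw [beq_iff_eq]; intro hcon; exact hgoal hcon.symm
    rcases hpre' with hk | hg | ⟨hsz, hlen, hdot⟩
    · rw [kRun, if_neg hng, if_neg (by omega), kRun]
      rw [dfsB, if_neg (fun hcon => hgoal hcon.symm), dif_neg (by omega)]
    · exact absurd hg hgoal
    · have := kRun_eq k size start hsz hlen hdot
        (fringeW k [(start, 0, PySem.Set.add PySem.Set.empty start)])
        [(start, 0, PySem.Set.add PySem.Set.empty start)] le_rfl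
        (by intro x hx; simp at hx; subst hx; exact List.Perm.refl _)
      rw [this, popFold]
      cases dfsB k size (findGoal start) start 0 (PySem.Set.add PySem.Set.empty start) with
      | some r => rfl
      | none => rw [popFold]
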